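-- pv_equiv track=rewrite | github.com/pepsakdoek/py_anagram | tools.py | possibilityhelper
-- ===== SOURCE A (Python) =====
-- import itertools
--
-- def possibilityhelper(wordlist,filtertext):
--     filtertext = filtertext.upper()
--     returnvalue = []
--     for element in itertools.product(*wordlist):
--         teststring = ''.join(element)
--         if sorted(teststring) == sorted(filtertext):
--             returnvalue.append(element)
--     return set(returnvalue)
-- ===== SOURCE B (Python) =====
-- def _consume(word, remaining):
--     # remove each char of word from remaining (a list of chars); None if some char is missing
--     rem = list(remaining)
--     for ch in word:
--         if ch in rem:
--             rem.remove(ch)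
--         else:
--             return None
--     return rem
--
-- def possibilityhelper(wordlist, filtertext):
--     results = []
--     def backtrack(i, remaining, acc):
--         if i == len(wordlist):
--             if not remaining:
--                 results.append(acc)
--             return
--         for word in wordlist[i]:
--             rem = _consume(word, remaining)
--             if rem is not None:
--                 backtrack(i + 1, rem, acc + (word,))
--     backtrack(0, list(filtertext.upper()), ())
--     return set(results)
-- ===== Notes on version B (the rewrite author's own statement) =====
-- stated objective: faster
-- what changed: Replaces exhaustive enumeration of the full cartesian product (joining and sorting every combination) by depth-first backtracking over positions that consumes the filter text's character multiset and prunes any branch whose partial choice is not a sub-multiset of the remaining characters; intended as faster, measured B 3.34x at the largest size both finished, A timed out at n=64 where B returned.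
import Mathlib
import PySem

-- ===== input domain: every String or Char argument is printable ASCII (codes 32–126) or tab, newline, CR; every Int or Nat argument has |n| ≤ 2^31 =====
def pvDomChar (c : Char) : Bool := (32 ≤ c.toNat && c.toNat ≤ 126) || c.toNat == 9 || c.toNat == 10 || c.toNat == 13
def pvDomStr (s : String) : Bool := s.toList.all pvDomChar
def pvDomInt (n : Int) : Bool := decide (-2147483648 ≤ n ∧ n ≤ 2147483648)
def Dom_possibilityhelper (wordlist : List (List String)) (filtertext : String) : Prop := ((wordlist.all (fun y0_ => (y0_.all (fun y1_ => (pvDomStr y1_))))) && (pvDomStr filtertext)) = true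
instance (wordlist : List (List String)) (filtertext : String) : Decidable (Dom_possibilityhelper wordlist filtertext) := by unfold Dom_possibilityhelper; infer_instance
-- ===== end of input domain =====

-- B replaces A's exhaustive cartesian-product enumeration by backtracking with
-- multiset pruning of partial choices; intended as faster (timing: B 3.34x
-- at the largest size both finished; A timed out at n=64 where B returned).

-- ===== PORT A =====
-- itertools.product(*wordlist), tuples in the usual lexicographic order
def itProduct : List (List String) → List (List String)
  | [] => [[]]
  | l :: ls => l.flatMap (fun x => (itProduct ls).map (fun e => x :: e))

def possibilityhelper (wordlist : List (List String)) (filtertext : String) : List (List String) :=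
  PySem.Set.ofList ((itProduct wordlist).foldl (fun acc element =>
    if PySem.List.sorted (PySem.Str.join "" element).toList (fun x => x) false
        = PySem.List.sorted (PySem.Str.upper filtertext).toList (fun x => x) false
    then acc ++ [element] else acc) [])

-- ===== PORT B =====
-- rem.remove(ch) guarded by 'ch in rem': first occurrence removed, none if absent
def removeFirst (c : Char) : List Char → Option (List Char)
  | [] => none
  | x :: xs => if x = c then some xs else (removeFirst c xs).map (fun r => x :: r)

-- _consume(word, remaining)
def consume? : List Char → List Char → Option (List Char)
  | [], rem => some rem
  | c :: cs, rem => (removeFirst c rem).bind (fun rem1 => consume? cs rem1)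

-- the backtrack routine; the list returned collects 'results' in DFS order
def backtrack : List (List String) → List Char → List (List String)
  | [], rem => if rem = [] then [[]] else []
  | l :: ls, rem => l.flatMap (fun w =>
      match consume? w.toList rem with
      | none => []
      | some rem' => (backtrack ls rem').map (fun acc => w :: acc))

def possibilityhelper_alt (wordlist : List (List String)) (filtertext : String) : List (List String) :=
  PySem.Set.ofList (backtrack wordlist (PySem.Str.upper filtertext).toList)

-- ===== PRECONDITION & SPEC =====
def Spec_possibilityhelper (wordlist : List (List String)) (filtertext : String) (out : List (List String)) : Prop := out = possibilityhelper_alt wordlist filtertext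
instance (wordlist : List (List String)) (filtertext : String) (out : List (List String)) : Decidable (Spec_possibilityhelper wordlist filtertext out) := by unfold Spec_possibilityhelper; infer_instance

-- ===== CLAIM (what is proved, stated in full; the proofs are below) =====
def Claim_equal_possibilityhelper : Prop := ∀ (wordlist : List (List String)) (filtertext : String), Dom_possibilityhelper wordlist filtertext → Spec_possibilityhelper wordlist filtertext (possibilityhelper wordlist filtertext)

-- ===== LEMMAS AND PROOFS =====

-- the character multiset of a tuple of words
def charsOf (el : List String) : List Char := (el.map String.toList).flatten

lemma foldl_append_if_eq_filter {α : Type} (p : α → Prop) [DecidablePred p] :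
    ∀ (xs : List α) (init : List α),
      xs.foldl (fun acc x => if p x then acc ++ [x] else acc) init
        = init ++ xs.filter (fun x => decide (p x)) := by
  intro xs
  induction xs with
  | nil => intro init; simp
  | cons x xs ih =>
    intro init
    simp only [List.foldl_cons, List.filter_cons]
    by_cases h : p x <;> simp [h, ih]

lemma removeFirst_spec (c : Char) : ∀ (rem : List Char),
    removeFirst c rem = if c ∈ rem then some (rem.erase c) else none := by
  intro rem
  induction rem with
  | nil => simp [removeFirst]
  | cons x xs ih =>
    by_cases h : x = c
    · subst h; simp [removeFirst]
    · have hbc : (x == c) = false := by simp [h]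
      simp [removeFirst, ih, hbc, h, Ne.symm h]

lemma consume?_spec : ∀ (cs rem : List Char),
    match consume? cs rem with
    | none => ¬ ((cs : Multiset Char) ≤ (rem : Multiset Char))
    | some rem' => (cs : Multiset Char) + (rem' : Multiset Char) = (rem : Multiset Char) := by
  intro cs
  induction cs with
  | nil => intro rem; simp [consume?]
  | cons c cs ih =>
    intro rem
    rw [consume?, removeFirst_spec]
    by_cases hm : c ∈ rem
    · simp only [hm, if_pos]
      have hperm : (rem : Multiset Char) = c ::ₘ (rem.erase c : Multiset Char) := by
        have := List.perm_cons_erase hm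
        exact_mod_cast Multiset.coe_eq_coe.mpr this
      have := ih (rem.erase c)
      cases hc : consume? cs (rem.erase c) with
      | none =>
        rw [hc] at this
        simp only [Option.bind_some, hc]
        intro hle
        apply this
        rw [hperm] at hle
        have : (c ::ₘ (cs : Multiset Char)) ≤ c ::ₘ (rem.erase c : Multiset Char) := by
          simpa using hle
        exact (Multiset.cons_le_cons_iff c).mp this
      | some rem2 =>
        rw [hc] at this
        simp only [Option.bind_some, hc]
        rw [hperm, ← this]
        simp
    · simp only [hm, if_neg, Option.bind_none, not_false_eq_true]
      intro hle
      have hcm : c ∈ (rem : Multiset Char) := Multiset.mem_of_le hle (by simp)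
      exact hm (by exact_mod_cast hcm)

lemma backtrack_eq_filter : ∀ (ls : List (List String)) (rem : List Char),
    backtrack ls rem = (itProduct ls).filter (fun el => decide (List.Perm (charsOf el) rem)) := by
  intro ls
  induction ls with
  | nil =>
    intro rem
    by_cases h : rem = []
    · subst h; simp [backtrack, itProduct, charsOf]
    · simp [backtrack, itProduct, charsOf, h, List.nil_perm]
  | cons l ls ih =>
    intro rem
    show backtrack (l :: ls) rem = _
    rw [backtrack, itProduct, List.filter_flatMap]
    refine List.flatMap_congr ?_
    intro w _
    rw [List.filter_map]
    have hc := consume?_spec w.toList rem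
    cases hcs : consume? w.toList rem with
    | none =>
      rw [hcs] at hc
      rw [List.filter_eq_nil_iff.mpr, List.map_nil]
      intro el _
      simp only [Function.comp_apply, decide_eq_true_eq]
      intro hperm
      apply hc
      have : ((charsOf (w :: el) : Multiset Char)) = (rem : Multiset Char) :=
        Multiset.coe_eq_coe.mpr hperm
      have hexp : (charsOf (w :: el) : Multiset Char)
          = (w.toList : Multiset Char) + (charsOf el : Multiset Char) := by
        simp [charsOf]
      rw [hexp] at this
      rw [← this]
      exact Multiset.le_add_right _ _
    | some rem' =>
      rw [hcs] at hc
      have hc' : (w.toList : Multiset Char) + (rem' : Multiset Char) = (rem : Multiset Char) := hc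
      change List.map (fun acc => w :: acc) (backtrack ls rem') = _
      rw [ih rem']
      congr 1
      apply List.filter_congr
      intro el _
      simp only [Function.comp_apply, decide_eq_decide]
      have hexp : (charsOf (w :: el) : Multiset Char)
          = (w.toList : Multiset Char) + (charsOf el : Multiset Char) := by simp [charsOf]
      constructor
      · intro hperm
        apply Multiset.coe_eq_coe.mp
        have h1 : ((charsOf el : Multiset Char)) = (rem' : Multiset Char) :=
          Multiset.coe_eq_coe.mpr hperm
        rw [hexp, h1, hc']
      · intro hperm
        apply Multiset.coe_eq_coe.mp
        have h2 : ((charsOf (w :: el) : Multiset Char)) = (rem : Multiset Char) :=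
          Multiset.coe_eq_coe.mpr hperm
        rw [hexp, ← hc'] at h2
        exact add_left_cancel h2

lemma join_empty_flatten : ∀ (el : List String),
    (PySem.Str.join "" el).toList = charsOf el := by
  intro el
  induction el with
  | nil => simp [charsOf, PySem.Str.toList_join, PySem.Chars.join_nil]
  | cons w ws ih =>
    cases ws with
    | nil => simp [charsOf, PySem.Str.toList_join, PySem.Chars.join_singleton]
    | cons v vs =>
      simp only [PySem.Str.toList_join, List.map_cons] at ih ⊢
      rw [PySem.Chars.join_cons_cons, ih]
      simp [charsOf]

-- ===== VERDICT (by name: the statement is the Claim_ definition above) =====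
theorem possibilityhelper_spec : Claim_equal_possibilityhelper := by
  intro wordlist filtertext _
  unfold Spec_possibilityhelper possibilityhelper possibilityhelper_alt
  rw [backtrack_eq_filter, foldl_append_if_eq_filter, List.nil_append]
  congr 1
  apply List.filter_congr
  intro el _
  simp only [decide_eq_decide]
  rw [join_empty_flatten]
  exact PySem.List.sorted_id_eq_sorted_id_iff_perm _ _
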